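-- pv_equiv track=rewrite | github.com/Sotten8/ASD-labs | 2nd_semester/lab_4/main.py | find_hanging_vertices
-- ===== SOURCE A (Python) =====
-- def find_hanging_vertices(matrix):
--     n = len(matrix)
--     hanging = []
--     for i in range(n):
--         out_degree = sum(matrix[i])
--         in_degree = sum(row[i] for row in matrix)
--         if in_degree + out_degree == 1:
--             hanging.append(i)
--     return hanging
-- ===== SOURCE B (Python) =====
-- def find_hanging_vertices(matrix):
--     n = len(matrix)
--     in_deg = [0] * n
--     out_deg = []
--     for row in matrix:
--         out_deg.append(sum(row))
--         for j in range(n):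
--             in_deg[j] += row[j]
--     return [i for i in range(n) if in_deg[i] + out_deg[i] == 1]
-- ===== Notes on version B (the rewrite author's own statement) =====
-- stated objective: faster
-- what changed: A recomputes every column sum with an inner scan over all rows for each i (O(n^2) passes over the matrix twice per vertex); B makes one pass over the matrix accumulating all in-degrees and out-degrees, then one pass over range(n) to filter.
import Mathlib
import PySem

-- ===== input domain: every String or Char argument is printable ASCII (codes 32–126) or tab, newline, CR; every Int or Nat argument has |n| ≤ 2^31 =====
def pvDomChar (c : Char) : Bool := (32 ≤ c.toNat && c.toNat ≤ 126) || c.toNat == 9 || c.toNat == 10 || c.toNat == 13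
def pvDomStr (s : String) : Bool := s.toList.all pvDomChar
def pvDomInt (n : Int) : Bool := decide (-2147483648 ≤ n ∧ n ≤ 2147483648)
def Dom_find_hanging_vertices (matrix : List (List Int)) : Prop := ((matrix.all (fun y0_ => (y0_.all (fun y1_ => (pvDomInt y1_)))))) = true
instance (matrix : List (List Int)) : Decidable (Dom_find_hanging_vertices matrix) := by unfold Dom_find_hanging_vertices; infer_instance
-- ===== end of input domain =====

-- B replaces A's per-vertex column rescans with one accumulating pass over the matrix (objective: faster).

-- ===== PORT A =====
def find_hanging_vertices (matrix : List (List Int)) : List Int :=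
  let n : Int := matrix.length
  (PySem.List.pyRange 0 n 1).foldl (fun hanging i =>
    let out_degree : Int := (PySem.List.pyGetD matrix i []).sum
    let in_degree : Int := (matrix.map (fun row => PySem.List.pyGetD row i 0)).sum
    if in_degree + out_degree = 1 then hanging ++ [i] else hanging) []

-- ===== PORT B =====
def find_hanging_vertices_alt (matrix : List (List Int)) : List Int :=
  let n : Int := matrix.length
  let acc := matrix.foldl
    (fun (acc : List Int × List Int) row =>
      (List.zipWith (· + ·) acc.1 row, acc.2 ++ [row.sum]))
    (List.replicate matrix.length 0, [])
  let in_deg := acc.1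
  let out_deg := acc.2
  (PySem.List.pyRange 0 n 1).filter (fun i =>
    decide (PySem.List.pyGetD in_deg i 0 + PySem.List.pyGetD out_deg i 0 = 1))

-- ===== PRECONDITION & SPEC =====
-- Pre_ excludes matrices containing a row shorter than len(matrix): there both A and B raise IndexError.
def Pre_find_hanging_vertices (matrix : List (List Int)) : Prop :=
  ∀ row ∈ matrix, matrix.length ≤ row.length
instance (matrix : List (List Int)) : Decidable (Pre_find_hanging_vertices matrix) := by
  unfold Pre_find_hanging_vertices; infer_instance
def pvWitness_find_hanging_vertices : List (List Int) := [[0, 1], [0, 0]]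

def Spec_find_hanging_vertices (matrix : List (List Int)) (out : List Int) : Prop := out = find_hanging_vertices_alt matrix
instance (matrix : List (List Int)) (out : List Int) : Decidable (Spec_find_hanging_vertices matrix out) := by unfold Spec_find_hanging_vertices; infer_instance

-- ===== CLAIM (what is proved, stated in full; the proofs are below) =====
def Claim_equal_find_hanging_vertices : Prop := ∀ (matrix : List (List Int)), Dom_find_hanging_vertices matrix → Pre_find_hanging_vertices matrix → Spec_find_hanging_vertices matrix (find_hanging_vertices matrix)

-- ===== LEMMAS AND PROOFS =====

-- length of B's in-degree accumulator is preserved by the fold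
theorem indeg_len (matrix : List (List Int)) (init : List Int)
    (h : ∀ row ∈ matrix, init.length ≤ row.length) :
    (matrix.foldl (fun a row => List.zipWith (· + ·) a row) init).length = init.length := by
  induction matrix generalizing init with
  | nil => rfl
  | cons row ms ih =>
    simp only [List.foldl_cons]
    have hlen : (List.zipWith (· + ·) init row).length = init.length := by
      simp [List.length_zipWith, Nat.min_eq_left (h row (by simp))]
    rw [ih _ (by intro r hr; rw [hlen]; exact h r (by simp [hr])), hlen]

-- B's in-degree accumulator at index j is init[j] plus the column-j sum
theorem indeg_get (matrix : List (List Int)) (init : List Int) (j : Nat)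
    (h : ∀ row ∈ matrix, init.length ≤ row.length) (hj : j < init.length) :
    (matrix.foldl (fun a row => List.zipWith (· + ·) a row) init).getD j 0
      = init.getD j 0 + (matrix.map (fun row => row.getD j 0)).sum := by
  induction matrix generalizing init with
  | nil => simp
  | cons row ms ih =>
    simp only [List.foldl_cons, List.map_cons, List.sum_cons]
    have hlen : (List.zipWith (· + ·) init row).length = init.length := by
      simp [List.length_zipWith, Nat.min_eq_left (h row (by simp))]
    have hjr : j < row.length := lt_of_lt_of_le hj (h row (by simp))
    rw [ih _ (by intro r hr; rw [hlen]; exact h r (by simp [hr])) (by omega)]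
    have : (List.zipWith (· + ·) init row).getD j 0 = init.getD j 0 + row.getD j 0 := by
      rw [List.getD_eq_getElem _ _ (by omega), List.getD_eq_getElem _ _ hj,
          List.getD_eq_getElem _ _ hjr, List.getElem_zipWith]
    rw [this]; ring

-- ===== VERDICT (by name: the statement is the Claim_ definition above) =====
theorem find_hanging_vertices_spec : Claim_equal_find_hanging_vertices := by
  intro matrix _ hpre
  unfold Spec_find_hanging_vertices find_hanging_vertices find_hanging_vertices_alt
  simp only []
  rw [PySem.List.foldl_prod_mk (f := fun a row => List.zipWith (· + ·) a row)
        (g := fun a row => a ++ [row.sum]),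
      PySem.List.foldl_append_singleton_eq_map, List.nil_append,
      PySem.List.foldl_append_ite_eq_filter, List.nil_append]
  apply List.filter_congr
  intro i hi
  have hmem := (PySem.List.mem_pyRange_one).mp hi
  have h0 : 0 ≤ i := hmem.1
  have hn' : i < (matrix.length : Int) := hmem.2
  have hn : i.toNat < matrix.length := by omega
  have hgetm : PySem.List.pyGetD matrix i [] = matrix[i.toNat] := by
    exact PySem.List.pyGetD_eq_getElem _ _ h0 hn'
  have hlenI : (matrix.foldl (fun a row => List.zipWith (· + ·) a row)
      (List.replicate matrix.length 0)).length = matrix.length := by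
    rw [indeg_len matrix _ (by simpa using hpre)]; simp
  have hin : PySem.List.pyGetD (matrix.foldl (fun a row => List.zipWith (· + ·) a row)
      (List.replicate matrix.length 0)) i 0
      = (matrix.map (fun row => row.getD i.toNat 0)).sum := by
    rw [PySem.List.pyGetD_of_nonneg _ _ h0,
        indeg_get matrix _ i.toNat (by simpa using hpre) (by simpa using hn)]
    simp
  have hout : PySem.List.pyGetD (matrix.map List.sum) i 0 = matrix[i.toNat].sum := by
    rw [PySem.List.pyGetD_eq_getElem _ _ h0 (by simpa using hn')]
    simp
  have hcol : (matrix.map (fun row => PySem.List.pyGetD row i 0)).sum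
      = (matrix.map (fun row => row.getD i.toNat 0)).sum := by
    congr 1
    apply List.map_congr_left
    intro row hrow
    exact PySem.List.pyGetD_of_nonneg _ _ h0
  rw [hin, hout, hgetm, hcol]
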